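-- pv_equiv track=rewrite | github.com/adam-fabricio/adventofcode | src/submarino.py | calcula_pontos_faltantes
-- ===== SOURCE A (Python) =====
-- def calcula_pontos_faltantes(caracters_faltantes: list) -> int:
--     caracters_faltantes = caracters_faltantes[::-1]
--
--     for i in range(len(caracters_faltantes)):
--         if caracters_faltantes[i] == ")":
--             caracters_faltantes[i] = 1
--         elif caracters_faltantes[i] == "]":
--             caracters_faltantes[i] = 2
--         elif caracters_faltantes[i] == "}":
--             caracters_faltantes[i] = 3
--         elif caracters_faltantes[i] == ">":
--             caracters_faltantes[i] = 4
--     pontos = 0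
--     for ponto in caracters_faltantes:
--         pontos = pontos * 5 + ponto
--
--     return pontos
-- ===== SOURCE B (Python) =====
-- def calcula_pontos_faltantes(caracters_faltantes: list) -> int:
--     pesos = {")": 1, "]": 2, "}": 3, ">": 4}
--     pontos = 0
--     mult = 1
--     for c in caracters_faltantes:
--         pontos += pesos[c] * mult
--         mult *= 5
--     return pontos
-- ===== Notes on version B (the rewrite author's own statement) =====
-- stated objective: simpler
-- what changed: B makes a single forward pass with an explicit power-of-five multiplier instead of building a reversed copy, rewriting chars to ints in place, and then applying Horner's rule.
import Mathlib
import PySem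

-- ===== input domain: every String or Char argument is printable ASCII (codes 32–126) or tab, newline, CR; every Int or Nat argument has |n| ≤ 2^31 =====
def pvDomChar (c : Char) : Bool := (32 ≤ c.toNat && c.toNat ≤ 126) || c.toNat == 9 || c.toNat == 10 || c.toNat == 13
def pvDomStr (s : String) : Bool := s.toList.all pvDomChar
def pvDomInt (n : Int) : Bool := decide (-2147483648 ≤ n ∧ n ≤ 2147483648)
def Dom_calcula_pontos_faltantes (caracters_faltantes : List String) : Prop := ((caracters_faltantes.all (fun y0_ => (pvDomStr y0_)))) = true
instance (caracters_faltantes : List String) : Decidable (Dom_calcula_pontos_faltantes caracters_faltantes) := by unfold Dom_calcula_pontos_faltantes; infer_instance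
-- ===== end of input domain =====

-- B replaces A's reversed copy + in-place char→int rewrite + Horner fold by a single
-- forward pass with an explicit power-of-five multiplier; return values proved equal on Pre_.

-- ===== PORT A =====
-- A's in-place rewrite turns ")" "]" "}" ">" into 1/2/3/4 and leaves any other string
-- unchanged, which makes the Horner step raise TypeError; Pre_ excludes those inputs,
-- so the value 0 used for unknown strings here is never reached under the claim.
def pvPesoA (s : String) : Int :=
  if s = ")" then 1
  else if s = "]" then 2
  else if s = "}" then 3
  else if s = ">" then 4
  else 0

def calcula_pontos_faltantes (caracters_faltantes : List String) : Int :=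
  -- caracters_faltantes = caracters_faltantes[::-1]; rewrite pass; then Horner fold
  let rev := (PySem.List.slice? caracters_faltantes none none (-1)).getD []
  let vals := rev.map pvPesoA
  vals.foldl (fun pontos ponto => pontos * 5 + ponto) 0

-- ===== PORT B =====
-- pesos = {")":1, "]":2, "}":3, ">":4}; pesos[c] raises KeyError on other strings,
-- excluded by Pre_ (the 0 default is never reached under the claim).
def pvPesosB : PySem.Dict String Int :=
  (((PySem.Dict.empty.insert ")" 1).insert "]" 2).insert "}" 3).insert ">" 4

def calcula_pontos_faltantes_alt (caracters_faltantes : List String) : Int :=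
  (caracters_faltantes.foldl
    (fun (st : Int × Int) c => (st.1 + (pvPesosB.getD c 0) * st.2, st.2 * 5))
    (0, 1)).1

-- ===== PRECONDITION & SPEC =====
-- Pre_ excludes exactly the inputs containing a string other than the four closers,
-- on which Python A raises TypeError (and B raises KeyError).
def Pre_calcula_pontos_faltantes (caracters_faltantes : List String) : Prop :=
  ∀ s ∈ caracters_faltantes, s = ")" ∨ s = "]" ∨ s = "}" ∨ s = ">"
instance (caracters_faltantes : List String) : Decidable (Pre_calcula_pontos_faltantes caracters_faltantes) := by
  unfold Pre_calcula_pontos_faltantes; infer_instance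

def pvWitness_calcula_pontos_faltantes : List String := [")", "]", "}", ">"]

def Spec_calcula_pontos_faltantes (caracters_faltantes : List String) (out : Int) : Prop := out = calcula_pontos_faltantes_alt caracters_faltantes
instance (caracters_faltantes : List String) (out : Int) : Decidable (Spec_calcula_pontos_faltantes caracters_faltantes out) := by unfold Spec_calcula_pontos_faltantes; infer_instance

-- ===== CLAIM (what is proved, stated in full; the proofs are below) =====
def Claim_equal_calcula_pontos_faltantes : Prop := ∀ (caracters_faltantes : List String), Dom_calcula_pontos_faltantes caracters_faltantes → Pre_calcula_pontos_faltantes caracters_faltantes → Spec_calcula_pontos_faltantes caracters_faltantes (calcula_pontos_faltantes caracters_faltantes)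

-- ===== LEMMAS AND PROOFS =====

-- the two weight functions agree on the four closers
theorem pvPeso_eq (s : String) (h : s = ")" ∨ s = "]" ∨ s = "}" ∨ s = ">") :
    pvPesosB.getD s 0 = pvPesoA s := by
  rcases h with h | h | h | h <;> subst h <;> decide

-- B's forward fold computes p + m * (Horner value of l read back-to-front)
theorem pvB_inv (l : List String) (p m : Int) :
    (l.foldl (fun (st : Int × Int) c => (st.1 + (pvPesosB.getD c 0) * st.2, st.2 * 5)) (p, m)).1
      = p + m * ((l.map pvPesoA).foldr (fun x a => a * 5 + x) 0) ∨
    ∃ s ∈ l, ¬ (s = ")" ∨ s = "]" ∨ s = "}" ∨ s = ">") := by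
  induction l generalizing p m with
  | nil => left; simp
  | cons s l ih =>
    by_cases hs : s = ")" ∨ s = "]" ∨ s = "}" ∨ s = ">"
    · rcases ih (p + (pvPesosB.getD s 0) * m) (m * 5) with h | ⟨t, ht, htn⟩
      · left
        rw [pvPeso_eq s hs] at h
        simp only [List.foldl_cons, List.map_cons, List.foldr_cons, pvPeso_eq s hs, h]
        ring
      · right; exact ⟨t, List.mem_cons_of_mem _ ht, htn⟩
    · right; exact ⟨s, List.mem_cons_self, hs⟩

-- ===== VERDICT (by name: the statement is the Claim_ definition above) =====
theorem calcula_pontos_faltantes_spec : Claim_equal_calcula_pontos_faltantes := by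
  intro l _ hpre
  unfold Spec_calcula_pontos_faltantes calcula_pontos_faltantes calcula_pontos_faltantes_alt
  rcases pvB_inv l 0 1 with h | ⟨s, hs, hn⟩
  · rw [h]
    simp only [PySem.List.slice?_none_none_neg_one, Option.getD_some, zero_add, one_mul]
    simp [List.map_reverse, List.foldl_reverse]
  · exact absurd (hpre s hs) hn
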